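-- pv_equiv track=rewrite | github.com/CaramelteaLatte/founders_backend | storage_utils.py | upsert_record
-- ===== SOURCE A (Python) =====
-- from typing import Iterable, List, Dict, Any, Sequence
--
-- def upsert_record(
--     records: Iterable[Dict[str, Any]],
--     new_record: Dict[str, Any],
--     key_fields: Sequence[str] = ("item", "name"),
-- ) -> List[Dict[str, Any]]:
--     key = tuple(new_record.get(field) for field in key_fields)
--     updated = []
--     found = False
--     for record in records:
--         record_key = tuple(record.get(field) for field in key_fields)
--         if not found and record_key == key:
--             updated.append(new_record)
--             found = True
--         else:
--             updated.append(record)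
--     if not found:
--         updated.append(new_record)
--     return updated
-- ===== SOURCE B (Python) =====
-- from typing import Iterable, List, Dict, Any, Sequence
--
-- def upsert_record(
--     records: Iterable[Dict[str, Any]],
--     new_record: Dict[str, Any],
--     key_fields: Sequence[str] = ("item", "name"),
-- ) -> List[Dict[str, Any]]:
--     key = tuple(new_record.get(field) for field in key_fields)
--     lst = list(records)
--     # stage 1: hash index of the FIRST position of every key tuple
--     first = {}
--     for i, record in enumerate(lst):
--         first.setdefault(tuple(record.get(field) for field in key_fields), i)
--     if key not in first:
--         return lst + [new_record]
--     hit = first[key]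
--     # stage 2: rebuild by position, swapping in new_record at the hit index
--     return [new_record if i == hit else record for i, record in enumerate(lst)]
-- ===== Notes on version B (the rewrite author's own statement) =====
-- stated objective: alternative
-- what changed: B works in two staged passes over a different data structure: it first builds a hash index mapping every key tuple to its first position, then looks the new record's key up in that index and rebuilds the output positionally with a comprehension, instead of A's single accumulating loop with a found flag.
import Mathlib
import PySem

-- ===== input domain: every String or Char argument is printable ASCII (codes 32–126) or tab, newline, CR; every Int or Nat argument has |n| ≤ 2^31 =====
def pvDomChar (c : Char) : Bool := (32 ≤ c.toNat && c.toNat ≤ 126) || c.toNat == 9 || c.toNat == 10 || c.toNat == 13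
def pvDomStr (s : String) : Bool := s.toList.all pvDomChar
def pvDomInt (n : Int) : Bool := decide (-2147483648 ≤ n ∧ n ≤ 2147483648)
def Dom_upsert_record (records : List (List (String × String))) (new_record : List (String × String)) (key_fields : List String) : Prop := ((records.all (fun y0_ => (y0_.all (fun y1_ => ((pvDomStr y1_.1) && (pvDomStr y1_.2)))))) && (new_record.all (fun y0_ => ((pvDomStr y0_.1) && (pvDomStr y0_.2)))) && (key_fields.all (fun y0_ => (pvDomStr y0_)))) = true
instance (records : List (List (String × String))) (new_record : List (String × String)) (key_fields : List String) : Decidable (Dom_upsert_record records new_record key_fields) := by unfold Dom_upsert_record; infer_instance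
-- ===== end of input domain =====

-- B replaces A's single accumulating loop with a found flag by two staged passes:
-- it first builds a hash index (dict) of the first position of every key tuple,
-- then rebuilds the output positionally; same O(n*k) cost, different structure.
-- ===== PORT A =====
-- dict.get(field): first-match lookup in the association list (Python dicts have unique keys)
def pvGetField (record : List (String × String)) (field : String) : Option String :=
  (record.find? (fun kv => kv.1 == field)).map (·.2)

def upsert_record (records : List (List (String × String))) (new_record : List (String × String)) (key_fields : List String) : List (List (String × String)) :=
  let key := key_fields.map (pvGetField new_record)
  let st := records.foldl (fun (st : List (List (String × String)) × Bool) record =>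
    let record_key := key_fields.map (pvGetField record)
    if !st.2 && record_key == key then (st.1 ++ [new_record], true)
    else (st.1 ++ [record], st.2)) ([], false)
  if !st.2 then st.1 ++ [new_record] else st.1

-- ===== PORT B =====
def upsert_record_alt (records : List (List (String × String))) (new_record : List (String × String)) (key_fields : List String) : List (List (String × String)) :=
  let key := key_fields.map (pvGetField new_record)
  -- stage 1: first = {}; for i, record in enumerate(lst): first.setdefault(key_of(record), i)
  let first := (PySem.List.enumerate records 0).foldl
    (fun (d : PySem.Dict (List (Option String)) Int) p =>
      d.setdefault (key_fields.map (pvGetField p.2)) p.1) PySem.Dict.empty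
  -- 'key not in first' / 'first[key]' as one lookup
  match first.get? key with
  | none => records ++ [new_record]
  -- stage 2: [new_record if i == hit else record for i, record in enumerate(lst)]
  | some hit => (PySem.List.enumerate records 0).map
      (fun p => if p.1 == hit then new_record else p.2)

-- ===== PRECONDITION & SPEC =====
def Spec_upsert_record (records : List (List (String × String))) (new_record : List (String × String)) (key_fields : List String) (out : List (List (String × String))) : Prop := out = upsert_record_alt records new_record key_fields
instance (records : List (List (String × String))) (new_record : List (String × String)) (key_fields : List String) (out : List (List (String × String))) : Decidable (Spec_upsert_record records new_record key_fields out) := by unfold Spec_upsert_record; infer_instance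

-- ===== CLAIM (what is proved, stated in full; the proofs are below) =====
def Claim_equal_upsert_record : Prop := ∀ (records : List (List (String × String))) (new_record : List (String × String)) (key_fields : List String), Dom_upsert_record records new_record key_fields → Spec_upsert_record records new_record key_fields (upsert_record records new_record key_fields)

-- ===== LEMMAS AND PROOFS =====
-- once found, A's loop just copies the remaining records
theorem foldl_loop_true (new_record : List (String × String)) (key_fields : List String)
    (key : List (Option String)) (rs : List (List (String × String)))
    (acc : List (List (String × String))) :
    (rs.foldl (fun (st : List (List (String × String)) × Bool) record =>
        let record_key := key_fields.map (pvGetField record)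
        if !st.2 && record_key == key then (st.1 ++ [new_record], true)
        else (st.1 ++ [record], st.2)) (acc, true)) = (acc ++ rs, true) := by
  induction rs generalizing acc with
  | nil => simp
  | cons r rs ih =>
    simp only [List.foldl_cons, Bool.not_true, Bool.false_and, Bool.false_eq_true, if_false, ih]
    simp

-- A's loop, with an arbitrary accumulator, characterised by findIdx?
theorem foldl_loop_char (new_record : List (String × String)) (key_fields : List String)
    (key : List (Option String)) (rs : List (List (String × String)))
    (acc : List (List (String × String))) :
    (rs.foldl (fun (st : List (List (String × String)) × Bool) record =>
        let record_key := key_fields.map (pvGetField record)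
        if !st.2 && record_key == key then (st.1 ++ [new_record], true)
        else (st.1 ++ [record], st.2)) (acc, false)) =
      match rs.findIdx? (fun r => key_fields.map (pvGetField r) == key) with
      | none => (acc ++ rs, false)
      | some i => (acc ++ rs.take i ++ [new_record] ++ rs.drop (i + 1), true) := by
  induction rs generalizing acc with
  | nil => simp
  | cons r rs ih =>
    by_cases h : (key_fields.map (pvGetField r) == key) = true
    · simp only [List.foldl_cons, Bool.not_false, Bool.true_and, h, if_true, foldl_loop_true,
        List.findIdx?_cons]
      simp
    · simp only [List.foldl_cons, Bool.not_false, Bool.true_and, h, if_false, Bool.false_eq_true,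
        ih, List.findIdx?_cons]
      cases hfi : rs.findIdx? (fun r => key_fields.map (pvGetField r) == key) <;>
        simp [List.append_assoc]

-- B's stage-1 dict of first positions, characterised by findIdx?
theorem dict_first_char (key_fields : List String) (key : List (Option String))
    (rs : List (List (String × String))) (n : Int)
    (d : PySem.Dict (List (Option String)) Int) :
    ((PySem.List.enumerate rs n).foldl
      (fun (d : PySem.Dict (List (Option String)) Int) p =>
        d.setdefault (key_fields.map (pvGetField p.2)) p.1) d).get? key =
      match d.get? key with
      | some v => some v
      | none =>
        match rs.findIdx? (fun r => key_fields.map (pvGetField r) == key) with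
        | none => none
        | some i => some (n + (i : Int)) := by
  induction rs generalizing n d with
  | nil => cases h : d.get? key <;> simp [PySem.List.enumerate, h]
  | cons r rs ih =>
    rw [PySem.List.enumerate_cons, List.foldl_cons, ih, List.findIdx?_cons]
    by_cases h : (key_fields.map (pvGetField r) == key) = true
    · have hk : key_fields.map (pvGetField r) = key := by simpa using h
      cases hd : d.get? key with
      | some v =>
        rw [hk] at *
        rw [PySem.Dict.get?_setdefault_self, hd]
        simp
      | none =>
        rw [hk] at *
        rw [PySem.Dict.get?_setdefault_self, hd]
        simp
    · have hne : key ≠ key_fields.map (pvGetField r) := by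
        intro he; rw [he] at h; simp at h
      rw [PySem.Dict.get?_setdefault_of_ne _ _ hne]
      cases hd : d.get? key with
      | some v => simp
      | none =>
        simp only [h, Bool.false_eq_true, if_false]
        cases hfi : rs.findIdx? (fun r => key_fields.map (pvGetField r) == key) with
        | none => simp
        | some i =>
          simp only [Option.map_some]
          have : ((i : Int) + 1) = ((i + 1 : Nat) : Int) := by push_cast; ring
          simp [← this]
          ring

-- a positional-replace comprehension whose target index is below all positions copies the list
theorem map_replace_low (new_record : List (String × String))
    (rs : List (List (String × String))) (n m : Int) (hm : m < n) :
    (PySem.List.enumerate rs n).map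
      (fun p => if p.1 == m then new_record else p.2) = rs := by
  induction rs generalizing n with
  | nil => simp [PySem.List.enumerate]
  | cons r rs ih =>
    rw [PySem.List.enumerate_cons, List.map_cons]
    have : (n == m) = false := by simp; omega
    rw [this]
    simp only [Bool.false_eq_true, if_false]
    rw [ih (n + 1) (by omega)]

-- B's stage-2 comprehension, against take/drop splicing
theorem map_replace_char (new_record : List (String × String))
    (rs : List (List (String × String))) (n : Int) (i : Nat) (hi : i < rs.length) :
    (PySem.List.enumerate rs n).map
      (fun p => if p.1 == n + (i : Int) then new_record else p.2) =
      rs.take i ++ [new_record] ++ rs.drop (i + 1) := by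
  induction rs generalizing n i with
  | nil => simp at hi
  | cons r rs ih =>
    rw [PySem.List.enumerate_cons, List.map_cons]
    cases i with
    | zero =>
      have : (n == n + ((0 : Nat) : Int)) = true := by simp
      rw [this]
      simp only [if_true]
      rw [map_replace_low new_record rs (n + 1) (n + ((0 : Nat) : Int)) (by simp)]
      simp
    | succ j =>
      have : (n == n + ((j + 1 : Nat) : Int)) = false := by simp; omega
      rw [this]
      simp only [Bool.false_eq_true, if_false]
      have hj : j < rs.length := by simpa using hi
      have harith : (fun (p : Int × List (String × String)) =>
          if p.1 == n + ((j + 1 : Nat) : Int) then new_record else p.2) =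
          (fun p => if p.1 == (n + 1) + (j : Int) then new_record else p.2) := by
        funext p; congr 1; push_cast; ring_nf
      rw [harith, ih (n + 1) j hj]
      simp

-- ===== VERDICT (by name: the statement is the Claim_ definition above) =====
theorem upsert_record_spec : Claim_equal_upsert_record := by
  intro records new_record key_fields _
  unfold Spec_upsert_record upsert_record upsert_record_alt
  simp only
  rw [foldl_loop_char, dict_first_char]
  rw [PySem.Dict.get?_empty]
  cases hfi : records.findIdx? (fun r =>
      key_fields.map (pvGetField r) == key_fields.map (pvGetField new_record)) with
  | none => simp
  | some i =>
    have hi : i < records.length := by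
      have := List.findIdx?_eq_some_iff_findIdx_eq.mp hfi
      exact this.1
    simp only [Bool.not_true, Bool.false_eq_true, if_false]
    rw [map_replace_char new_record records 0 i hi]
    simp
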